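-- pv_equiv track=rewrite | github.com/ag502/algorithm | Problem/Good_bye_BOJ_2020_A_끝말잇기/main.py | last_word_game
-- ===== SOURCE A (Python) =====
-- def get_last_char(word):
--     return word[len(word) - 1]
--
-- def get_first_char(word):
--     return word[0]
--
-- def last_word_game(words, visited, cur_idx, num_of_words, spoke_word):
--     # 1. 방문
--     visited[cur_idx] = True
--     spoke_word.append(words[cur_idx])
--     # 2. 가능한 주변 탐색
--     for next_idx in range(num_of_words):
--         # 3. 갈 수 있는지 검사
--         if not visited[next_idx] and get_last_char(words[cur_idx]) == get_first_char(words[next_idx]):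
--             # 4. 간다
--             return last_word_game(words, visited, next_idx, num_of_words, spoke_word)
--     # 5. 체크아웃
--     visited[cur_idx] = False
--     if len(spoke_word) == num_of_words:
--         return 1
--     return 0
-- ===== SOURCE B (Python) =====
-- def last_word_game(words, visited, cur_idx, num_of_words, spoke_word):
--     # Iterative greedy walk with the candidate indices bucketed once by first
--     # character, instead of A's recursion that rescans all words at every step.
--     # Performs the same observable mutations of `visited` and `spoke_word` as A.
--     visited[cur_idx] = True
--     spoke_word.append(words[cur_idx])
--     buckets = {}
--     for j in range(num_of_words):
--         if not visited[j]:
--             buckets.setdefault(words[j][:1], []).append(j)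
--     for b in buckets.values():
--         b.reverse()             # so that pop() yields the smallest remaining index
--     idx = cur_idx
--     while True:
--         bucket = buckets.get(words[idx][-1:])
--         if not bucket:
--             visited[idx] = False
--             return 1 if len(spoke_word) == num_of_words else 0
--         idx = bucket.pop()
--         visited[idx] = True
--         spoke_word.append(words[idx])
-- ===== Notes on version B (the rewrite author's own statement) =====
-- stated objective: alternative
-- what changed: A's recursion rescans all num_of_words words at every step of the chain; B buckets the unvisited indices by first character in one pass and then walks the chain iteratively, popping the smallest remaining index of the needed bucket, so no per-step rescan remains.
import Mathlib
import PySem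

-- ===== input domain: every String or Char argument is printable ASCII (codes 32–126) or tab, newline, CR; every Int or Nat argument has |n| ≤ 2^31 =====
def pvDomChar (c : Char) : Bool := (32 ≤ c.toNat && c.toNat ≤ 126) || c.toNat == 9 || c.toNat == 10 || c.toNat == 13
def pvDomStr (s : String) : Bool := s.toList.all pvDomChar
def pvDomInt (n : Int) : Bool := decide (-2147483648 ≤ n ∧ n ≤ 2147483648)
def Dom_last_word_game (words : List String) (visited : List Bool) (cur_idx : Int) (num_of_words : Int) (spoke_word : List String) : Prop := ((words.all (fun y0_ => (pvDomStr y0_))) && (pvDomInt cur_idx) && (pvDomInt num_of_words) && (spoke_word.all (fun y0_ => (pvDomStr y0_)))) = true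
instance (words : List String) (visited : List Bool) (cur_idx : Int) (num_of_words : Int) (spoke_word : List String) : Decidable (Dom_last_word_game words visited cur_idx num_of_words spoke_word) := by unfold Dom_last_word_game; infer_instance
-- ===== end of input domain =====

-- B replaces A's recursive walk, which rescans every word at each step, by one
-- bucketing pass over the indices keyed by first character followed by an iterative
-- walk that pops the smallest remaining candidate index from a bucket; both Pythons
-- perform the same mutations of `visited`/`spoke_word`, and the theorems below are
-- about the return value.

-- ===== PORT A =====

-- word[len(word) - 1]  (none = IndexError on the empty word; excluded by Pre_)
def pv_get_last_char (word : String) : Option Char :=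
  PySem.Str.pyGet? word (PySem.Str.len word - 1)

-- word[0]
def pv_get_first_char (word : String) : Option Char :=
  PySem.Str.pyGet? word 0

-- the 'for next_idx in range(num_of_words)' scan with its early return
def pvA_scan (words : List String) (visited : List Bool) (cur_idx : Int) :
    List Int → Option Int
  | [] => none
  | j :: rest =>
    if PySem.List.pyGetD visited j true = false ∧
        pv_get_last_char (PySem.List.pyGetD words cur_idx "") =
          pv_get_first_char (PySem.List.pyGetD words j "") then
      some j
    else pvA_scan words visited cur_idx rest

-- A's recursion; the fuel argument only makes the recursion structural: a chain makes
-- at most num_of_words + 1 calls (one unit per call), so the fuel below never runs out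
def pvA_go (words : List String) (num_of_words : Int) :
    Nat → List Bool → Int → List String → Int
  | 0, _, _, _ => 0
  | fuel + 1, visited, cur_idx, spoke_word =>
    let visited1 := PySem.List.pySetD visited cur_idx true
    let spoke1 := spoke_word ++ [PySem.List.pyGetD words cur_idx ""]
    match pvA_scan words visited1 cur_idx (PySem.List.pyRange 0 num_of_words 1) with
    | some next_idx => pvA_go words num_of_words fuel visited1 next_idx spoke1
    | none =>
      if PySem.List.len spoke1 = num_of_words then 1 else 0

def last_word_game (words : List String) (visited : List Bool) (cur_idx : Int) (num_of_words : Int) (spoke_word : List String) : Int :=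
  pvA_go words num_of_words (num_of_words.toNat + 1) visited cur_idx spoke_word


-- ===== PORT B =====

-- the bucket-building loop: buckets.setdefault(words[j][:1], []).append(j)
def pvB_buckets (words : List String) (visited : List Bool) (num_of_words : Int) :
    PySem.Dict String (List Int) :=
  (PySem.List.pyRange 0 num_of_words 1).foldl
    (fun d j =>
      if PySem.List.pyGetD visited j true = false then
        d.modify (PySem.Str.slice (PySem.List.pyGetD words j "") none (some 1)) []
          (· ++ [j])
      else d)
    PySem.Dict.empty

-- 'for b in buckets.values(): b.reverse()' (pop() then yields the smallest index)
def pvB_reverseVals (d : PySem.Dict String (List Int)) : PySem.Dict String (List Int) :=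
  PySem.Dict.mk (d.items.map (fun p => (p.1, p.2.reverse)))

-- the 'while True' walk; bucket.pop() is PySem.List.pop? at -1 and the in-place pop is
-- modelled by re-inserting the remainder; same fuel discipline as pvA_go
def pvB_go (words : List String) (num_of_words : Int) :
    Nat → PySem.Dict String (List Int) → List Bool → Int → List String → Int
  | 0, _, _, _, _ => 0
  | fuel + 1, buckets, visited, idx, spoke_word =>
    let key := PySem.Str.slice (PySem.List.pyGetD words idx "") (some (-1)) none
    match PySem.List.pop? (buckets.getD key []) (-1) with
    | none =>
      if PySem.List.len spoke_word = num_of_words then 1 else 0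
    | some (j, rest) =>
      pvB_go words num_of_words fuel (buckets.insert key rest)
        (PySem.List.pySetD visited j true) j
        (spoke_word ++ [PySem.List.pyGetD words j ""])

def last_word_game_alt (words : List String) (visited : List Bool) (cur_idx : Int) (num_of_words : Int) (spoke_word : List String) : Int :=
  let visited1 := PySem.List.pySetD visited cur_idx true
  let spoke1 := spoke_word ++ [PySem.List.pyGetD words cur_idx ""]
  let buckets := pvB_reverseVals (pvB_buckets words visited1 num_of_words)
  pvB_go words num_of_words (num_of_words.toNat + 1) buckets visited1 cur_idx spoke1


-- ===== PRECONDITION & SPEC =====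

-- the position at which 'visited[cur_idx] = True' lands (Python negative indexing)
def pvCurV (visited : List Bool) (cur_idx : Int) : Int :=
  if cur_idx < 0 then cur_idx + visited.length else cur_idx

-- Pre_ = exactly the inputs on which the Python A returns normally (elsewhere it raises
-- IndexError): cur_idx a valid (possibly negative) index of both lists and, when
-- 0 < num_of_words: visited[j] readable for every scanned j; every scanned
-- still-unvisited word indexable and non-empty (its first character is read; the
-- current word is marked visited before the scan, hence the pvCurV exemption); and the
-- current word non-empty when an unvisited candidate exists (its last character is read).
def Pre_last_word_game (words : List String) (visited : List Bool) (cur_idx : Int) (num_of_words : Int) (spoke_word : List String) : Prop :=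
  PySem.Raise.InRange visited.length cur_idx ∧
  PySem.Raise.InRange words.length cur_idx ∧
  (0 < num_of_words →
    num_of_words ≤ PySem.List.len visited ∧
    (∀ j : Nat, j < num_of_words.toNat → (j : Int) ≠ pvCurV visited cur_idx →
      PySem.List.pyGetD visited (j : Int) true = false →
      ((j : Int) < PySem.List.len words ∧ PySem.List.pyGetD words (j : Int) "" ≠ "")) ∧
    ((∃ j : Nat, j < num_of_words.toNat ∧ (j : Int) ≠ pvCurV visited cur_idx ∧
        PySem.List.pyGetD visited (j : Int) true = false) →
      PySem.List.pyGetD words cur_idx "" ≠ ""))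

instance (words : List String) (visited : List Bool) (cur_idx : Int) (num_of_words : Int) (spoke_word : List String) : Decidable (Pre_last_word_game words visited cur_idx num_of_words spoke_word) := by unfold Pre_last_word_game; infer_instance

def pvWitness_last_word_game : List String × List Bool × Int × Int × List String :=
  (["ab", "ba"], [false, false], 0, 2, [])

def Spec_last_word_game (words : List String) (visited : List Bool) (cur_idx : Int) (num_of_words : Int) (spoke_word : List String) (out : Int) : Prop := out = last_word_game_alt words visited cur_idx num_of_words spoke_word

instance (words : List String) (visited : List Bool) (cur_idx : Int) (num_of_words : Int) (spoke_word : List String) (out : Int) : Decidable (Spec_last_word_game words visited cur_idx num_of_words spoke_word out) := by unfold Spec_last_word_game; infer_instance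


-- ===== CLAIM (what is proved, stated in full; the proofs are below) =====

def Claim_equal_last_word_game : Prop := ∀ (words : List String) (visited : List Bool) (cur_idx : Int) (num_of_words : Int) (spoke_word : List String), Dom_last_word_game words visited cur_idx num_of_words spoke_word → Pre_last_word_game words visited cur_idx num_of_words spoke_word → Spec_last_word_game words visited cur_idx num_of_words spoke_word (last_word_game words visited cur_idx num_of_words spoke_word)


-- ===== LEMMAS AND PROOFS =====

-- every still-unvisited scannable word is non-empty (carried down the walk)
def pvGoodV (words : List String) (num_of_words : Int) (V : List Bool) : Prop :=
  ∀ j : Int, 0 ≤ j → j < num_of_words →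
    PySem.List.pyGetD V j true = false → PySem.List.pyGetD words j "" ≠ ""

-- the candidate indices a bucket holds, in ascending order: the unvisited scanned
-- indices whose first character matches the key
def pvCands (words : List String) (V : List Bool) (num_of_words : Int) (key : String) :
    List Int :=
  (PySem.List.pyRange 0 num_of_words 1).filter
    (fun j => (PySem.Str.slice (PySem.List.pyGetD words j "") none (some 1) == key) &&
      (decide (PySem.List.pyGetD V j true = false)))

theorem pv_pySetD_eq_set (xs : List Bool) (i : Int) (v : Bool)
    (h : PySem.Raise.InRange xs.length i) :
    PySem.List.pySetD xs i v = xs.set (if i < 0 then i + xs.length else i).toNat v := by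
  rcases h with ⟨h1, h2⟩
  simp only [PySem.List.pySetD, PySem.List.pySet?, PySem.List.pyIdx?]
  split <;> rename_i hc <;> split <;> rename_i hc2 <;>
    simp only [Option.map_some, Option.getD_some] <;>
    first
      | omega
      | (congr 1; omega)

theorem pv_mark_getD (V : List Bool) (j k : Int) (h0 : 0 ≤ j) (hj : j < (V.length : Int))
    (hk : 0 ≤ k) :
    PySem.List.pyGetD (PySem.List.pySetD V j true) k true =
      if k = j then true else PySem.List.pyGetD V k true := by
  rw [PySem.List.pySetD_of_nonneg V true h0,
    PySem.List.pyGetD_of_nonneg _ true hk, PySem.List.pyGetD_of_nonneg _ true hk]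
  by_cases hkj : k = j
  · subst hkj
    rw [if_pos rfl, List.getD, List.getElem?_set_self (by omega)]
    rfl
  · have hne : j.toNat ≠ k.toNat := by omega
    rw [if_neg hkj, List.getD, List.getD, List.getElem?_set_ne hne]

theorem pv_markAny_getD (V : List Bool) (i k : Int) (v dflt : Bool)
    (h : PySem.Raise.InRange V.length i) (hk : 0 ≤ k) :
    PySem.List.pyGetD (PySem.List.pySetD V i v) k dflt =
      if k = pvCurV V i then v else PySem.List.pyGetD V k dflt := by
  have hcv : 0 ≤ pvCurV V i ∧ pvCurV V i < (V.length : Int) := by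
    rcases h with ⟨h1, h2⟩; unfold pvCurV; split <;> omega
  rw [pv_pySetD_eq_set V i v h,
    show (if i < 0 then i + (V.length : Int) else i) = pvCurV V i from rfl,
    PySem.List.pyGetD_of_nonneg _ dflt hk, PySem.List.pyGetD_of_nonneg _ dflt hk]
  by_cases hkc : k = pvCurV V i
  · rw [if_pos hkc, hkc, List.getD, List.getElem?_set_self (by omega)]; rfl
  · rw [if_neg hkc, List.getD, List.getD, List.getElem?_set_ne (by omega)]

theorem pvGoodV_mark (words : List String) (num : Int) (V : List Bool) (j : Int)
    (hG : pvGoodV words num V) (h0 : 0 ≤ j) (hj : j < (V.length : Int)) :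
    pvGoodV words num (PySem.List.pySetD V j true) := by
  intro k hk0 hkn hv
  rw [pv_mark_getD V j k h0 hj hk0] at hv
  by_cases hkj : k = j
  · rw [if_pos hkj] at hv; exact absurd hv (by simp)
  · rw [if_neg hkj] at hv; exact hG k hk0 hkn hv

theorem pvCands_mark (words : List String) (num : Int) (V : List Bool) (j : Int)
    (h0 : 0 ≤ j) (hj : j < (V.length : Int)) (key' : String) :
    pvCands words (PySem.List.pySetD V j true) num key' =
      (pvCands words V num key').filter (fun k => !(k == j)) := by
  unfold pvCands
  rw [List.filter_filter]
  apply List.filter_congr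
  intro a ha
  have ha0 : 0 ≤ a := by
    have := (PySem.List.mem_pyRange_one).1 ha
    omega
  rw [pv_mark_getD V j a h0 hj ha0]
  by_cases haj : a = j
  · subst haj
    simp
  · rw [if_neg haj]
    simp [haj]

theorem pv_charkey (w wj : String) (hwj : wj ≠ "") :
    (pv_get_last_char w = pv_get_first_char wj) ↔
      (PySem.Str.slice wj none (some 1) == PySem.Str.slice w (some (-1)) none) = true := by
  obtain ⟨c, t, hjl⟩ : ∃ c t, wj.toList = c :: t := by
    cases hlj : wj.toList with
    | nil => exact absurd (String.toList_inj.mp (by simpa using hlj)) hwj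
    | cons c t => exact ⟨c, t, rfl⟩
  have hfirst : pv_get_first_char wj = some c := by
    simp [pv_get_first_char, PySem.Str.pyGet?, PySem.Chars.pyGet?_eq_listPyGet?, hjl]
  have hsl1 : (PySem.Str.slice wj none (some 1)).toList = [c] := by
    simp [PySem.Str.slice, PySem.Chars.slice_eq_listSlice, hjl, PySem.List.slice_to]
  rw [beq_iff_eq, ← String.toList_inj, hfirst, hsl1]
  rcases (w.toList).eq_nil_or_concat with h | ⟨ys, x, h⟩
  · have hw : w = "" := String.toList_inj.mp (by simpa using h)
    subst hw
    rw [show pv_get_last_char "" = none from rfl,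
      show (PySem.Str.slice "" (some (-1)) none).toList = [] from rfl]
    simp
  · have hlast : pv_get_last_char w = some x := by
      simp [pv_get_last_char, PySem.Str.pyGet?, PySem.Chars.pyGet?_eq_listPyGet?, h]
    have hslm1 : (PySem.Str.slice w (some (-1)) none).toList = [x] := by
      simp [PySem.Str.slice, PySem.Chars.slice_eq_listSlice, h, PySem.List.slice_from_neg_one]
    rw [hlast, hslm1]
    simp [eq_comm]

theorem pvCands_mark_self (words : List String) (num : Int) (V : List Bool) (j : Int)
    (tl : List Int) (key : String) (hj0 : 0 ≤ j) (hjlen : j < (V.length : Int))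
    (hcs : pvCands words V num key = j :: tl) :
    pvCands words (PySem.List.pySetD V j true) num key = tl := by
  have hnd : (pvCands words V num key).Nodup :=
    List.Nodup.filter _ (PySem.List.nodup_pyRange_one 0 num)
  rw [hcs] at hnd
  have hjt : j ∉ tl := (List.nodup_cons.1 hnd).1
  rw [pvCands_mark words num V j hj0 hjlen key, hcs, List.filter_cons]
  simp only [beq_self_eq_true, Bool.not_true, if_false, Bool.false_eq_true]
  exact List.filter_eq_self.mpr (fun k hk => by
    simp only [Bool.not_eq_true', beq_eq_false_iff_ne, ne_eq]
    intro hkj; exact hjt (hkj ▸ hk))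

theorem pvCands_mark_ne (words : List String) (num : Int) (V : List Bool) (j : Int)
    (key key' : String) (hj0 : 0 ≤ j) (hjlen : j < (V.length : Int)) (hne : key' ≠ key)
    (hjmem : j ∈ pvCands words V num key) :
    pvCands words (PySem.List.pySetD V j true) num key' = pvCands words V num key' := by
  have hkeyj : PySem.Str.slice (PySem.List.pyGetD words j "") none (some 1) = key := by
    have hmem2 := (List.mem_filter.1 hjmem).2
    simp only [Bool.and_eq_true] at hmem2
    exact beq_iff_eq.1 hmem2.1
  rw [pvCands_mark words num V j hj0 hjlen key']
  apply List.filter_eq_self.mpr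
  intro k hk
  simp only [Bool.not_eq_true', beq_eq_false_iff_ne, ne_eq]
  intro hkj
  have hk2 := (List.mem_filter.1 hk).2
  simp only [Bool.and_eq_true] at hk2
  subst hkj
  exact hne ((beq_iff_eq.1 hk2.1).symm.trans hkeyj)

theorem pv_revVals_get? : ∀ (l : List (String × List Int)) (c : String),
    (PySem.Dict.mk (l.map (fun p => (p.1, p.2.reverse)))).get? c =
      ((PySem.Dict.mk l).get? c).map List.reverse := by
  intro l
  induction l with
  | nil => intro c; rfl
  | cons p rest ih =>
    obtain ⟨k, v⟩ := p
    intro c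
    simp only [List.map_cons, PySem.Dict.get?_mk_cons]
    by_cases h : (k == c) = true
    · rw [if_pos h, if_pos h]; rfl
    · rw [if_neg h, if_neg h]; exact ih c

theorem pv_revVals_getD (d : PySem.Dict String (List Int)) (c : String) :
    (pvB_reverseVals d).getD c [] = (d.getD c []).reverse := by
  rcases d with ⟨l⟩
  rw [PySem.Dict.getD_eq_get?_getD, PySem.Dict.getD_eq_get?_getD, pvB_reverseVals,
    pv_revVals_get?]
  cases (PySem.Dict.mk l).get? c <;> rfl

theorem pv_build_getD (words : List String) (V : List Bool) (c : String) :
    ∀ (L : List Int) (d : PySem.Dict String (List Int)),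
      (L.foldl (fun d j =>
          if PySem.List.pyGetD V j true = false then
            d.modify (PySem.Str.slice (PySem.List.pyGetD words j "") none (some 1)) []
              (· ++ [j])
          else d) d).getD c [] =
        d.getD c [] ++ L.filter (fun j =>
          (PySem.Str.slice (PySem.List.pyGetD words j "") none (some 1) == c) &&
          (decide (PySem.List.pyGetD V j true = false))) := by
  intro L
  induction L with
  | nil => intro d; simp
  | cons j L ih =>
    intro d
    rw [List.foldl_cons, List.filter_cons]
    by_cases hv : PySem.List.pyGetD V j true = false
    · rw [if_pos hv, ih]
      rw [PySem.Dict.getD_modify]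
      by_cases hkc : c = PySem.Str.slice (PySem.List.pyGetD words j "") none (some 1)
      · rw [if_pos hkc, if_pos (by rw [← hkc, beq_self_eq_true, decide_eq_true hv]; rfl)]
        simp [hkc]
      · rw [if_neg hkc,
          if_neg (by
            intro hpred
            simp only [Bool.and_eq_true, beq_iff_eq] at hpred
            exact hkc hpred.1.symm)]
    · rw [if_neg hv, ih, if_neg (by rw [decide_eq_false hv]; simp)]

theorem pvB_buckets_getD (words : List String) (V : List Bool) (num : Int) (c : String) :
    (pvB_buckets words V num).getD c [] = pvCands words V num c := by
  rw [pvB_buckets, pv_build_getD, pvCands, PySem.Dict.getD_empty, List.nil_append]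

theorem pv_scan_aux (words : List String) (V : List Bool) (idx num : Int)
    (hG : pvGoodV words num V) :
    ∀ L : List Int, (∀ j ∈ L, 0 ≤ j ∧ j < num) →
      pvA_scan words V idx L = (L.filter (fun j =>
        (PySem.Str.slice (PySem.List.pyGetD words j "") none (some 1) ==
          PySem.Str.slice (PySem.List.pyGetD words idx "") (some (-1)) none) &&
        (decide (PySem.List.pyGetD V j true = false)))).head? := by
  intro L
  induction L with
  | nil => intro _; rfl
  | cons j rest ih =>
    intro hmem
    obtain ⟨hj0, hjn⟩ := hmem j (List.mem_cons_self ..)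
    have hrest := fun k hk => hmem k (List.mem_cons_of_mem _ hk)
    rw [pvA_scan, List.filter_cons]
    by_cases hv : PySem.List.pyGetD V j true = false
    · have hne := hG j hj0 hjn hv
      have hck := pv_charkey (PySem.List.pyGetD words idx "")
        (PySem.List.pyGetD words j "") hne
      by_cases hc : pv_get_last_char (PySem.List.pyGetD words idx "") =
          pv_get_first_char (PySem.List.pyGetD words j "")
      · rw [if_pos ⟨hv, hc⟩, if_pos (by rw [hck.1 hc, decide_eq_true hv]; rfl)]
        rfl
      · have hb : (PySem.Str.slice (PySem.List.pyGetD words j "") none (some 1) ==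
            PySem.Str.slice (PySem.List.pyGetD words idx "") (some (-1)) none) = false := by
          rw [← Bool.not_eq_true]; exact fun h => hc (hck.2 h)
        rw [if_neg (fun hand => hc hand.2), if_neg (by rw [hb]; simp)]
        exact ih hrest
    · rw [if_neg (fun hand => hv hand.1), if_neg (by rw [decide_eq_false hv]; simp)]
      exact ih hrest

theorem pv_scan_eq (words : List String) (V : List Bool) (idx : Int) (num : Int)
    (hG : pvGoodV words num V) :
    pvA_scan words V idx (PySem.List.pyRange 0 num 1) =
      (pvCands words V num
        (PySem.Str.slice (PySem.List.pyGetD words idx "") (some (-1)) none)).head? := by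
  rw [pvCands]
  exact pv_scan_aux words V idx num hG _ (fun j hj => by
    have := PySem.List.mem_pyRange_one.1 hj; omega)

theorem pv_go_eq (words : List String) (num : Int) :
    ∀ (fuel : Nat) (V : List Bool) (idx : Int) (spoke : List String)
      (d : PySem.Dict String (List Int)),
      (0 < num → num ≤ (V.length : Int)) →
      pvGoodV words num (PySem.List.pySetD V idx true) →
      (∀ key, d.getD key [] =
        (pvCands words (PySem.List.pySetD V idx true) num key).reverse) →
      pvA_go words num fuel V idx spoke =
        pvB_go words num fuel d (PySem.List.pySetD V idx true) idx
          (spoke ++ [PySem.List.pyGetD words idx ""]) := by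
  intro fuel
  induction fuel with
  | zero => intros; rfl
  | succ fuel ih =>
    intro V idx spoke d hlen hG hinv
    simp only [pvA_go, pvB_go]
    rw [pv_scan_eq words (PySem.List.pySetD V idx true) idx num hG, hinv]
    cases h : pvCands words (PySem.List.pySetD V idx true) num
        (PySem.Str.slice (PySem.List.pyGetD words idx "") (some (-1)) none) with
    | nil => rfl
    | cons j tl =>
      have hjmem : j ∈ pvCands words (PySem.List.pySetD V idx true) num
          (PySem.Str.slice (PySem.List.pyGetD words idx "") (some (-1)) none) := by
        rw [h]; exact List.mem_cons_self ..
      have hjrange := (List.mem_filter.1 hjmem).1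
      obtain ⟨hj0, hjn⟩ : 0 ≤ j ∧ j < num := by
        have := PySem.List.mem_pyRange_one.1 hjrange; omega
      have hnum : 0 < num := by omega
      have hlenV1 : ((PySem.List.pySetD V idx true).length : Int) = (V.length : Int) := by
        rw [PySem.List.length_pySetD]
      have hjlen : j < ((PySem.List.pySetD V idx true).length : Int) := by
        rw [hlenV1]; exact lt_of_lt_of_le hjn (hlen hnum)
      rw [List.reverse_cons]
      rw [show PySem.List.pop? (tl.reverse ++ [j]) (-1) = some (j, tl.reverse) by
        simp [pysem]]
      have := ih (PySem.List.pySetD V idx true) j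
        (spoke ++ [PySem.List.pyGetD words idx ""]) (d.insert
          (PySem.Str.slice (PySem.List.pyGetD words idx "") (some (-1)) none) tl.reverse)
        (fun hn => by rw [hlenV1]; exact hlen hn)
        (pvGoodV_mark words num _ j hG hj0 hjlen)
        (fun key' => by
          rw [PySem.Dict.getD_insert]
          by_cases hkk : key' =
              PySem.Str.slice (PySem.List.pyGetD words idx "") (some (-1)) none
          · rw [if_pos hkk, hkk,
              pvCands_mark_self words num _ j tl _ hj0 hjlen h]
          · rw [if_neg hkk, hinv key',
              pvCands_mark_ne words num _ j _ key' hj0 hjlen hkk hjmem])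
      exact this


-- ===== VERDICT (by name: the statement is the Claim_ definition above) =====

theorem last_word_game_spec : Claim_equal_last_word_game := by
  unfold Claim_equal_last_word_game
  intro words visited cur_idx num spoke _hdom hpre
  obtain ⟨hcv, hcw, hpos⟩ := hpre
  unfold Spec_last_word_game last_word_game last_word_game_alt
  exact pv_go_eq words num (num.toNat + 1) visited cur_idx spoke
    (pvB_reverseVals (pvB_buckets words (PySem.List.pySetD visited cur_idx true) num))
    (fun hn => by
      have := (hpos hn).1
      rwa [PySem.List.len_eq] at this)
    (fun j hj0 hjn hv => by
      have hn : 0 < num := by omega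
      obtain ⟨hnv, hall, _⟩ := hpos hn
      rw [pv_markAny_getD visited cur_idx j true true hcv hj0] at hv
      by_cases hjc : j = pvCurV visited cur_idx
      · rw [if_pos hjc] at hv; exact absurd hv (by simp)
      · rw [if_neg hjc] at hv
        have hjnat : (j.toNat : Int) = j := by omega
        have := hall j.toNat (by omega) (by rw [hjnat]; exact hjc) (by rw [hjnat]; exact hv)
        rw [hjnat] at this
        exact this.2)
    (fun key => by rw [pv_revVals_getD, pvB_buckets_getD])
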